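-- pv_equiv track=rewrite | github.com/Merik-D/algorithms | lab2/papers.py | find_min_board_size
-- ===== SOURCE A (Python) =====
-- def find_min_board_size(N, W, H):
--     min_side = min(W, H) * N
--     for i in range(2, N + 1):
--         cols = N // i
--         rows = i
--
--         if N % i != 0:
--             if H > W:
--                 cols += 1
--             else:
--                 rows += 1
--
--         current_side = max(W * cols, H * rows)
--         min_side = min(min_side, current_side)
--
--     return min_side
-- ===== SOURCE B (Python) =====
-- def find_min_board_size(N, W, H):
--     # Divisor-block jumping: N//i is constant on O(sqrt(N)) blocks of i; inside a
--     # block the side is monotone between divisor points, so only the block's first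
--     # index, last index and the one before the last can be minimal.
--     def side(i):
--         cols = N // i
--         rows = i
--         if N % i != 0:
--             if H > W:
--                 cols += 1
--             else:
--                 rows += 1
--         return max(W * cols, H * rows)
--
--     best = min(W, H) * N
--     i = 2
--     while i <= N:
--         c = N // i
--         r = N // c
--         best = min(best, min(side(i), min(side(max(i, r - 1)), side(r))))
--         i = max(r + 1, i + 1)
--     return best
-- ===== Notes on version B (the rewrite author's own statement) =====
-- stated objective: faster
-- what changed: Replaces the linear scan over every row count i in [2,N] by divisor-block jumping: i advances block-by-block over the O(sqrt(N)) distinct values of N//i, evaluating the side only at the (at most three) candidate indices of each block where the piecewise-monotone objective can attain its minimum.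
import Mathlib
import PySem

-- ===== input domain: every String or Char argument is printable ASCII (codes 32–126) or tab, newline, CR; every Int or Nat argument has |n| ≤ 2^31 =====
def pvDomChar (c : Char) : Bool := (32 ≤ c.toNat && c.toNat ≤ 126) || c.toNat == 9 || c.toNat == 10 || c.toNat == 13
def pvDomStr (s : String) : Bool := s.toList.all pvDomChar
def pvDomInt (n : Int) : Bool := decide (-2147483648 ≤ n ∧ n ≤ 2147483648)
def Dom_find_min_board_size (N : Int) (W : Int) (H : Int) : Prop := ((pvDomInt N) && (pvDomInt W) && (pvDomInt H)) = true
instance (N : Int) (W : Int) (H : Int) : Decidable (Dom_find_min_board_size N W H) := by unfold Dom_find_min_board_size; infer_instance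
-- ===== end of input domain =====

-- B replaces A's linear scan over i ∈ [2,N] by divisor-block jumping over the O(√N)
-- distinct values of N//i (objective: faster, asymptotic).


-- ===== PORT A =====
def find_min_board_size (N : Int) (W : Int) (H : Int) : Int :=
  (PySem.List.pyRange 2 (N + 1) 1).foldl
    (fun min_side i =>
      let cols := PySem.Int.floordiv N i
      let rows := i
      let cr := if PySem.Int.mod N i != 0 then
                  (if H > W then (cols + 1, rows) else (cols, rows + 1))
                else (cols, rows)
      min min_side (max (W * cr.1) (H * cr.2)))
    (min W H * N)

-- ===== PORT B =====
-- Source B's local helper `side(i)`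
def pvSide (N : Int) (W : Int) (H : Int) (i : Int) : Int :=
  let cols := PySem.Int.floordiv N i
  let rows := i
  let cr := if PySem.Int.mod N i != 0 then
              (if H > W then (cols + 1, rows) else (cols, rows + 1))
            else (cols, rows)
  max (W * cr.1) (H * cr.2)

-- Source B's while-loop
def pvBlock (N : Int) (W : Int) (H : Int) (i : Int) (best : Int) : Int :=
  if _h : i ≤ N then
    let c := PySem.Int.floordiv N i
    let r := PySem.Int.floordiv N c
    pvBlock N W H (max (r + 1) (i + 1))
      (min best (min (pvSide N W H i) (min (pvSide N W H (max i (r - 1))) (pvSide N W H r))))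
  else best
termination_by (N + 1 - i).toNat
decreasing_by omega

def find_min_board_size_alt (N : Int) (W : Int) (H : Int) : Int :=
  pvBlock N W H 2 (min W H * N)

-- ===== PRECONDITION & SPEC =====
def Spec_find_min_board_size (N : Int) (W : Int) (H : Int) (out : Int) : Prop := out = find_min_board_size_alt N W H
instance (N : Int) (W : Int) (H : Int) (out : Int) : Decidable (Spec_find_min_board_size N W H out) := by unfold Spec_find_min_board_size; infer_instance

-- ===== CLAIM (what is proved, stated in full; the proofs are below) =====
def Claim_equal_find_min_board_size : Prop := ∀ (N : Int) (W : Int) (H : Int), Dom_find_min_board_size N W H → Spec_find_min_board_size N W H (find_min_board_size N W H)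

-- ===== LEMMAS AND PROOFS =====

-- A's loop, written as a tail recursion on the index.
def pvScan (N : Int) (W : Int) (H : Int) (i : Int) (acc : Int) : Int :=
  if _h : i ≤ N then pvScan N W H (i + 1) (min acc (pvSide N W H i)) else acc
termination_by (N + 1 - i).toNat
decreasing_by omega

theorem pvScan_eq_fold (N W H : Int) : ∀ (a acc : Int),
    (PySem.List.pyRange a (N + 1) 1).foldl (fun m i => min m (pvSide N W H i)) acc
      = pvScan N W H a acc := by
  suffices h : ∀ (k : Nat) (a acc : Int), (N + 1 - a).toNat ≤ k →
      (PySem.List.pyRange a (N + 1) 1).foldl (fun m i => min m (pvSide N W H i)) acc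
        = pvScan N W H a acc from fun a acc => h (N + 1 - a).toNat a acc le_rfl
  intro k
  induction k with
  | zero =>
    intro a acc hk
    rw [PySem.List.pyRange_one_eq_nil (by omega), List.foldl_nil, pvScan, dif_neg (by omega)]
  | succ k ih =>
    intro a acc hk
    by_cases ha : a ≤ N
    · rw [PySem.List.pyRange_one_cons (by omega : a < N + 1), List.foldl_cons,
        pvScan, dif_pos ha]
      exact ih (a + 1) _ (by omega)
    · rw [PySem.List.pyRange_one_eq_nil (by omega), List.foldl_nil, pvScan, dif_neg ha]

-- pvScan is at most its accumulator
theorem pvScan_le_acc (N W H i acc : Int) : pvScan N W H i acc ≤ acc := by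
  fun_induction pvScan with
  | case1 i acc h ih => exact le_trans ih (min_le_left _ _)
  | case2 i acc h => exact le_rfl

-- pvScan is at most every scanned side
theorem pvScan_le_side (N W H : Int) : ∀ (i acc j : Int), i ≤ j → j ≤ N →
    pvScan N W H i acc ≤ pvSide N W H j := by
  suffices h : ∀ (k : Nat) (i acc j : Int), (N + 1 - i).toNat ≤ k → i ≤ j → j ≤ N →
      pvScan N W H i acc ≤ pvSide N W H j from
    fun i acc j => h (N + 1 - i).toNat i acc j le_rfl
  intro k
  induction k with
  | zero => intro i acc j hk hij hjN; exfalso; omega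
  | succ k ih =>
    intro i acc j hk hij hjN
    rw [pvScan, dif_pos (by omega : i ≤ N)]
    rcases eq_or_lt_of_le hij with rfl | hlt
    · exact le_trans (pvScan_le_acc _ _ _ _ _) (min_le_right _ _)
    · exact ih (i + 1) _ j (by omega) (by omega) hjN

-- pvScan returns the accumulator or some scanned side
theorem pvScan_reaches (N W H : Int) : ∀ (i acc : Int),
    pvScan N W H i acc = acc ∨ ∃ j, i ≤ j ∧ j ≤ N ∧ pvScan N W H i acc = pvSide N W H j := by
  suffices h : ∀ (k : Nat) (i acc : Int), (N + 1 - i).toNat ≤ k →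
      pvScan N W H i acc = acc ∨ ∃ j, i ≤ j ∧ j ≤ N ∧ pvScan N W H i acc = pvSide N W H j from
    fun i acc => h (N + 1 - i).toNat i acc le_rfl
  intro k
  induction k with
  | zero => intro i acc hk; rw [pvScan, dif_neg (by omega)]; exact Or.inl rfl
  | succ k ih =>
    intro i acc hk
    by_cases hiN : i ≤ N
    · rw [pvScan, dif_pos hiN]
      rcases ih (i + 1) (min acc (pvSide N W H i)) (by omega) with h1 | ⟨j, hj1, hj2, h1⟩
      · rw [h1]
        rcases le_total acc (pvSide N W H i) with hax | hax
        · exact Or.inl (min_eq_left hax)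
        · exact Or.inr ⟨i, le_rfl, hiN, min_eq_right hax⟩
      · exact Or.inr ⟨j, by omega, hj2, h1⟩
    · rw [pvScan, dif_neg hiN]; exact Or.inl rfl

-- block arithmetic facts
theorem pvBlock_facts (N i : Int) (h2 : 2 ≤ i) (hN : i ≤ N) :
    1 ≤ PySem.Int.floordiv N i ∧
    i ≤ PySem.Int.floordiv N (PySem.Int.floordiv N i) ∧
    PySem.Int.floordiv N (PySem.Int.floordiv N i) ≤ N := by
  have hi : (0:Int) < i := by omega
  rw [PySem.Int.floordiv_eq_ediv_of_pos hi]
  have hc : 1 ≤ N / i := (Int.le_ediv_iff_mul_le hi).2 (by omega)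
  have hcpos : (0:Int) < N / i := by omega
  rw [PySem.Int.floordiv_eq_ediv_of_pos hcpos]
  have hdm := Int.mul_ediv_add_emod N i
  have hm0 := Int.emod_nonneg N (ne_of_gt hi)
  refine ⟨hc, ?_, ?_⟩
  · exact (Int.le_ediv_iff_mul_le hcpos).2 (by linarith)
  · have : N / (N / i) < N + 1 := (Int.ediv_lt_iff_lt_mul hcpos).2 (by nlinarith)
    omega

-- every index of the block has the same quotient
theorem pvBlock_quot (N i j : Int) (h2 : 2 ≤ i) (hN : i ≤ N) (hij : i ≤ j)
    (hjr : j ≤ PySem.Int.floordiv N (PySem.Int.floordiv N i)) :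
    PySem.Int.floordiv N j = PySem.Int.floordiv N i := by
  have hi : (0:Int) < i := by omega
  have hj : (0:Int) < j := by omega
  have hc : 1 ≤ N / i := (Int.le_ediv_iff_mul_le hi).2 (by omega)
  have hcpos : (0:Int) < N / i := by omega
  rw [PySem.Int.floordiv_eq_ediv_of_pos hi, PySem.Int.floordiv_eq_ediv_of_pos hcpos] at hjr
  rw [PySem.Int.floordiv_eq_ediv_of_pos hj, PySem.Int.floordiv_eq_ediv_of_pos hi]
  have h1 : N / i ≤ N / j := by
    refine (Int.le_ediv_iff_mul_le hj).2 ?_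
    have hdm := Int.mul_ediv_add_emod N (N / i)
    have hm0 := Int.emod_nonneg N (ne_of_gt hcpos)
    have hmul : (N / i) * j ≤ (N / i) * (N / (N / i)) :=
      mul_le_mul_of_nonneg_left hjr (le_of_lt hcpos)
    linarith
  have h2' : N / j < N / i + 1 := by
    refine (Int.ediv_lt_iff_lt_mul hj).2 ?_
    have hdm := Int.mul_ediv_add_emod N i
    have hm1 := Int.emod_lt_of_pos N hi
    have hmul : (N / i + 1) * i ≤ (N / i + 1) * j := mul_le_mul_of_nonneg_left hij (by omega)
    nlinarith
  omega

-- a non-final index of the block is not a divisor of N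
theorem pvBlock_nondiv (N i j : Int) (h2 : 2 ≤ i) (hN : i ≤ N) (hij : i ≤ j)
    (hjr : j < PySem.Int.floordiv N (PySem.Int.floordiv N i)) :
    PySem.Int.mod N j ≠ 0 := by
  have hi : (0:Int) < i := by omega
  have hj : (0:Int) < j := by omega
  have hquot := pvBlock_quot N i j h2 hN hij (le_of_lt hjr)
  have hc : 1 ≤ N / i := (Int.le_ediv_iff_mul_le hi).2 (by omega)
  have hcpos : (0:Int) < N / i := by omega
  rw [PySem.Int.floordiv_eq_ediv_of_pos hj, PySem.Int.floordiv_eq_ediv_of_pos hi] at hquot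
  rw [PySem.Int.floordiv_eq_ediv_of_pos hi, PySem.Int.floordiv_eq_ediv_of_pos hcpos] at hjr
  rw [PySem.Int.mod_eq_emod_of_pos hj]
  intro h0
  have hdm := Int.mul_ediv_add_emod N j
  have hNj : j * (N / i) = N := by rw [← hquot]; linarith
  have hrj : N / (N / i) = j := by
    calc N / (N / i) = (j * (N / i)) / (N / i) := by rw [hNj]
    _ = j := Int.mul_ediv_cancel _ (ne_of_gt hcpos)
  rw [hrj] at hjr
  exact lt_irrefl j hjr

-- shape of the side at a non-divisor index with quotient c
theorem pvSide_nondiv (N W H j c : Int) (hq : PySem.Int.floordiv N j = c)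
    (hm : PySem.Int.mod N j ≠ 0) :
    pvSide N W H j = if H > W then max (W * (c + 1)) (H * j) else max (W * c) (H * (j + 1)) := by
  have hb : (PySem.Int.mod N j != 0) = true := by simpa [bne_iff_ne] using hm
  simp only [pvSide, hq, hb, if_true]
  split_ifs <;> rfl

-- covering: the three candidates dominate every index of the block
theorem pvCover (N W H i j : Int) (h2 : 2 ≤ i) (hN : i ≤ N) (hij : i ≤ j)
    (hjr : j ≤ PySem.Int.floordiv N (PySem.Int.floordiv N i)) :
    min (pvSide N W H i)
      (min (pvSide N W H (max i (PySem.Int.floordiv N (PySem.Int.floordiv N i) - 1)))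
        (pvSide N W H (PySem.Int.floordiv N (PySem.Int.floordiv N i))))
      ≤ pvSide N W H j := by
  rcases eq_or_lt_of_le hjr with heq | hlt
  · rw [heq]; exact le_trans (min_le_right _ _) (min_le_right _ _)
  · have hmax : max i (PySem.Int.floordiv N (PySem.Int.floordiv N i) - 1)
        = PySem.Int.floordiv N (PySem.Int.floordiv N i) - 1 := max_eq_right (by omega)
    have hqj := pvBlock_quot N i j h2 hN hij (le_of_lt hlt)
    have hqr1 := pvBlock_quot N i (PySem.Int.floordiv N (PySem.Int.floordiv N i) - 1)
      h2 hN (by omega) (by omega)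
    have hmj := pvBlock_nondiv N i j h2 hN hij hlt
    have hmi := pvBlock_nondiv N i i h2 hN le_rfl (by omega)
    have hmr1 := pvBlock_nondiv N i (PySem.Int.floordiv N (PySem.Int.floordiv N i) - 1)
      h2 hN (by omega) (by omega)
    rw [hmax, pvSide_nondiv N W H j _ hqj hmj, pvSide_nondiv N W H i _ rfl hmi,
      pvSide_nondiv N W H _ _ hqr1 hmr1]
    rcases le_or_gt 0 H with hH | hH
    · refine le_trans (min_le_left _ _) ?_
      split_ifs with h
      · exact max_le_max le_rfl (mul_le_mul_of_nonneg_left hij hH)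
      · exact max_le_max le_rfl (mul_le_mul_of_nonneg_left (by omega) hH)
    · refine le_trans (le_trans (min_le_right _ _) (min_le_left _ _)) ?_
      split_ifs with h
      · exact max_le_max le_rfl (mul_le_mul_of_nonpos_left (by omega) (le_of_lt hH))
      · exact max_le_max le_rfl (mul_le_mul_of_nonpos_left (by omega) (le_of_lt hH))

theorem pvBlock_le_acc (N W H : Int) : ∀ (i acc : Int), pvBlock N W H i acc ≤ acc := by
  suffices h : ∀ (k : Nat) (i acc : Int), (N + 1 - i).toNat ≤ k → pvBlock N W H i acc ≤ acc from
    fun i acc => h (N + 1 - i).toNat i acc le_rfl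
  intro k
  induction k with
  | zero => intro i acc hk; rw [pvBlock, dif_neg (by omega)]
  | succ k ih =>
    intro i acc hk
    by_cases hiN : i ≤ N
    · rw [pvBlock, dif_pos hiN]
      exact le_trans (ih _ _ (by omega)) (min_le_left _ _)
    · rw [pvBlock, dif_neg hiN]

theorem pvBlock_reaches (N W H : Int) : ∀ (i acc : Int), 2 ≤ i →
    pvBlock N W H i acc = acc ∨ ∃ j, i ≤ j ∧ j ≤ N ∧ pvBlock N W H i acc = pvSide N W H j := by
  suffices h : ∀ (k : Nat) (i acc : Int), (N + 1 - i).toNat ≤ k → 2 ≤ i →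
      pvBlock N W H i acc = acc ∨ ∃ j, i ≤ j ∧ j ≤ N ∧ pvBlock N W H i acc = pvSide N W H j from
    fun i acc => h (N + 1 - i).toNat i acc le_rfl
  intro k
  induction k with
  | zero => intro i acc hk h2; rw [pvBlock, dif_neg (by omega)]; exact Or.inl rfl
  | succ k ih =>
    intro i acc hk h2
    by_cases hiN : i ≤ N
    · obtain ⟨hc1, hir, hrN⟩ := pvBlock_facts N i h2 hiN
      rw [pvBlock, dif_pos hiN]
      rcases ih (max (PySem.Int.floordiv N (PySem.Int.floordiv N i) + 1) (i + 1)) _ (by omega) (by omega) with h1 | ⟨j, hj1, hj2, h1⟩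
      · rw [h1]
        rcases le_total acc (min (pvSide N W H i)
            (min (pvSide N W H (max i (PySem.Int.floordiv N (PySem.Int.floordiv N i) - 1)))
              (pvSide N W H (PySem.Int.floordiv N (PySem.Int.floordiv N i))))) with hax | hax
        · exact Or.inl (min_eq_left hax)
        · refine Or.inr ?_
          rw [min_eq_right hax]
          rcases min_cases (pvSide N W H i)
              (min (pvSide N W H (max i (PySem.Int.floordiv N (PySem.Int.floordiv N i) - 1)))
                (pvSide N W H (PySem.Int.floordiv N (PySem.Int.floordiv N i)))) with ⟨hx, _⟩ | ⟨hx, _⟩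
          · exact ⟨i, le_rfl, hiN, hx⟩
          · rw [hx]
            rcases min_cases (pvSide N W H (max i (PySem.Int.floordiv N (PySem.Int.floordiv N i) - 1)))
                (pvSide N W H (PySem.Int.floordiv N (PySem.Int.floordiv N i))) with ⟨hy, _⟩ | ⟨hy, _⟩
            · exact ⟨max i (PySem.Int.floordiv N (PySem.Int.floordiv N i) - 1),
                le_max_left _ _, by omega, hy⟩
            · exact ⟨PySem.Int.floordiv N (PySem.Int.floordiv N i), hir, hrN, hy⟩
      · exact Or.inr ⟨j, by omega, hj2, h1⟩
    · rw [pvBlock, dif_neg hiN]; exact Or.inl rfl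

theorem pvBlock_le_side (N W H : Int) : ∀ (i acc j : Int), 2 ≤ i → i ≤ j → j ≤ N →
    pvBlock N W H i acc ≤ pvSide N W H j := by
  suffices h : ∀ (k : Nat) (i acc j : Int), (N + 1 - i).toNat ≤ k → 2 ≤ i → i ≤ j → j ≤ N →
      pvBlock N W H i acc ≤ pvSide N W H j from
    fun i acc j => h (N + 1 - i).toNat i acc j le_rfl
  intro k
  induction k with
  | zero => intro i acc j hk h2 hij hjN; exfalso; omega
  | succ k ih =>
    intro i acc j hk h2 hij hjN
    have hiN : i ≤ N := le_trans hij hjN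
    obtain ⟨hc1, hir, hrN⟩ := pvBlock_facts N i h2 hiN
    rw [pvBlock, dif_pos hiN]
    rcases le_or_gt j (PySem.Int.floordiv N (PySem.Int.floordiv N i)) with hjr | hjr
    · exact le_trans (pvBlock_le_acc N W H _ _)
        (le_trans (min_le_right _ _) (pvCover N W H i j h2 hiN hij hjr))
    · exact ih _ _ j (by omega) (by omega) (by omega) hjN

theorem pvScan_eq_block (N W H i acc : Int) (h2 : 2 ≤ i) :
    pvScan N W H i acc = pvBlock N W H i acc := by
  refine le_antisymm ?_ ?_
  · rcases pvBlock_reaches N W H i acc h2 with h | ⟨j, hij, hjN, h⟩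
    · rw [h]; exact pvScan_le_acc N W H i acc
    · rw [h]; exact pvScan_le_side N W H i acc j hij hjN
  · rcases pvScan_reaches N W H i acc with h | ⟨j, hij, hjN, h⟩
    · rw [h]; exact pvBlock_le_acc N W H i acc
    · rw [h]; exact pvBlock_le_side N W H i acc j h2 hij hjN

-- ===== VERDICT (by name: the statement is the Claim_ definition above) =====
theorem find_min_board_size_spec : Claim_equal_find_min_board_size := by
  intro N W H _
  show find_min_board_size N W H = find_min_board_size_alt N W H
  unfold find_min_board_size find_min_board_size_alt
  rw [show (fun (min_side i : Int) =>
      let cols := PySem.Int.floordiv N i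
      let rows := i
      let cr := if PySem.Int.mod N i != 0 then
                  (if H > W then (cols + 1, rows) else (cols, rows + 1))
                else (cols, rows)
      min min_side (max (W * cr.1) (H * cr.2))) = fun m i => min m (pvSide N W H i) from rfl]
  rw [pvScan_eq_fold]
  exact pvScan_eq_block N W H 2 (min W H * N) (by norm_num)
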